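-- pv_equiv track=rewrite | github.com/won2lee/preProc | trns/utils_v2.py | get_sents_lenth_new
-- ===== SOURCE A (Python) =====
-- def get_sents_lenth_new(source, sbol):
--
--     if type(source[0]) is not list:
--         source = [source]
--
--     #    ^  p  가  _ 계속 _ 오른 다 _  .
--     #    0         3     5       8    [10]       <=XX
--     #    3         2     3       2               <=XX  XX_len = 4
--     #    2         1     2       1               <=XX_subracted
--
--     source_lengths = [len(s) for s in source]
--     #XX = [list(chain(*[[i,i+1] for i,k in enumerate(s) if k in sbol[0]])) for s in source]
--     XX = [[i for i,k in enumerate(s) if k in sbol] for s in source]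
--     XX = [XX[i] + [source_lengths[i]] for i in range(len(XX))]   #len(XX): Batch size
--     #to_sub = [[i for i,x in enumerate(xx) if x in to_add[j]] for j, xx in enumerate(XX)]
--     XX = [[s[i]-s[i-1] for i in range(len(s)) if i>0] for s in XX]     # index to interval lenth(어절의 길이)
--     XX_len = [len(s) for s in XX]    # 문장의 어절 갯수
--     XX_subtracted = [[x-1 if x>0 else 0 for x in xx ] for xx in XX]
--     return XX_len, XX, XX_subtracted
-- ===== SOURCE B (Python) =====
-- def get_sents_lenth_new(source, sbol):
--
--     if type(source[0]) is not list:
--         source = [source]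
--
--     XX_len, XX, XX_subtracted = [], [], []
--     for s in source:
--         intervals = []
--         prev = None
--         for i, k in enumerate(s):
--             if k in sbol:
--                 if prev is not None:
--                     intervals.append(i - prev)
--                 prev = i
--         if prev is not None:
--             intervals.append(len(s) - prev)
--         XX_len.append(len(intervals))
--         XX.append(intervals)
--         XX_subtracted.append([x - 1 if x > 0 else 0 for x in intervals])
--     return XX_len, XX, XX_subtracted
-- ===== Notes on version B (the rewrite author's own statement) =====
-- stated objective: simpler
-- what changed: Replaces the five whole-list comprehension passes (positions list, append length, diff pass, length pass, subtraction pass) by a single loop per sentence that maintains the previous marker position and emits each interval directly.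
import Mathlib
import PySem

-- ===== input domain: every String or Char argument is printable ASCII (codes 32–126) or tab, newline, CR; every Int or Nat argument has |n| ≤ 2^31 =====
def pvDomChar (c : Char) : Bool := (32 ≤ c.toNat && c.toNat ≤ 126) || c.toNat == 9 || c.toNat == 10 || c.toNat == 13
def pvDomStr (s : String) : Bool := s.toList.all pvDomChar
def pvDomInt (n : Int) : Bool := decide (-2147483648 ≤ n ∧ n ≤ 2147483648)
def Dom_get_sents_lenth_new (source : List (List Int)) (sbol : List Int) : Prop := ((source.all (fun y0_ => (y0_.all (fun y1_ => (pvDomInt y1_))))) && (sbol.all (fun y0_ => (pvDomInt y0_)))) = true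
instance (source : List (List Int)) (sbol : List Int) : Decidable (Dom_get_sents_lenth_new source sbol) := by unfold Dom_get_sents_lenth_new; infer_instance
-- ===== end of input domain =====

-- B replaces A's five list-comprehension passes by one pass per sentence that keeps the
-- previous marker position and emits each interval directly (objective: simpler).
-- Pre_ excludes only source = [], where the Python A (and B) raise IndexError on source[0].


-- ===== PORT A =====
-- A: [s[i]-s[i-1] for i in range(len(s)) if i>0]  (indices always in range, ported with getD)
def pyAdjRow (t : List Int) : List Int :=
  (((List.range t.length).filter (fun i => decide (0 < i))).map
    (fun i => t.getD i 0 - t.getD (i - 1) 0))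

-- "if type(source[0]) is not list: source=[source]": on the typed domain source[0] is always a
-- list, so the guard only raises IndexError on source = [] (excluded by Pre_); [] case is a stub.
def get_sents_lenth_new (source : List (List Int)) (sbol : List Int) : List Int × List (List Int) × List (List Int) :=
  match source with
  | [] => ([], [], [])
  | _ =>
    let source_lengths : List Int := source.map (fun s => (s.length : Int))
    let XX1 : List (List Int) :=
      source.map (fun s =>
        ((PySem.List.enumerate s 0).filter (fun p => sbol.contains p.2)).map (fun p => p.1))
    let XX2 : List (List Int) :=
      (List.range XX1.length).map (fun i => XX1.getD i [] ++ [source_lengths.getD i 0])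
    let XX3 : List (List Int) := XX2.map pyAdjRow
    let XX_len : List Int := XX3.map (fun s => (s.length : Int))
    let XX_subtracted : List (List Int) :=
      XX3.map (fun xx => xx.map (fun x => if 0 < x then x - 1 else 0))
    (XX_len, XX3, XX_subtracted)

-- ===== PORT B =====
def altStep (sbol : List Int) (st : List Int × Option Int) (p : Int × Int) : List Int × Option Int :=
  if sbol.contains p.2 then
    ((match st.2 with
      | some prev => st.1 ++ [p.1 - prev]
      | none => st.1), some p.1)
  else st

def altRow (sbol : List Int) (s : List Int) : List Int :=
  let st := (PySem.List.enumerate s 0).foldl (altStep sbol) ([], none)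
  match st.2 with
  | some prev => st.1 ++ [(s.length : Int) - prev]
  | none => st.1

def get_sents_lenth_new_alt (source : List (List Int)) (sbol : List Int) : List Int × List (List Int) × List (List Int) :=
  if source.isEmpty then ([], [], [])  -- source[0] raises in Python; excluded by Pre_
  else
    source.foldl
      (fun (acc : List Int × List (List Int) × List (List Int)) s =>
        let intervals := altRow sbol s
        (acc.1 ++ [(intervals.length : Int)],
         acc.2.1 ++ [intervals],
         acc.2.2 ++ [intervals.map (fun x => if 0 < x then x - 1 else 0)]))
      ([], [], [])

-- ===== PRECONDITION & SPEC =====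
-- Pre_ excludes exactly source = [], on which Python A raises IndexError at source[0].
def Pre_get_sents_lenth_new (source : List (List Int)) (sbol : List Int) : Prop := source ≠ []
instance (source : List (List Int)) (sbol : List Int) : Decidable (Pre_get_sents_lenth_new source sbol) := by unfold Pre_get_sents_lenth_new; infer_instance
def pvWitness_get_sents_lenth_new : List (List Int) × List Int := ([[1, 2, 1, 3], [2]], [1])

def Spec_get_sents_lenth_new (source : List (List Int)) (sbol : List Int) (out : List Int × List (List Int) × List (List Int)) : Prop := out = get_sents_lenth_new_alt source sbol
instance (source : List (List Int)) (sbol : List Int) (out : List Int × List (List Int) × List (List Int)) : Decidable (Spec_get_sents_lenth_new source sbol out) := by unfold Spec_get_sents_lenth_new; infer_instance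

-- ===== CLAIM (what is proved, stated in full; the proofs are below) =====
def Claim_equal_get_sents_lenth_new : Prop := ∀ (source : List (List Int)) (sbol : List Int), Dom_get_sents_lenth_new source sbol → Pre_get_sents_lenth_new source sbol → Spec_get_sents_lenth_new source sbol (get_sents_lenth_new source sbol)

-- ===== LEMMAS AND PROOFS =====

-- adjacent differences of a list, structural form
def adjDiffs : List Int → List Int
  | [] => []
  | [_] => []
  | a :: b :: r => (b - a) :: adjDiffs (b :: r)

-- chainFrom prev ps: the differences B's inner loop emits while scanning marker positions ps
def chainFrom : Option Int → List Int → List Int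
  | _, [] => []
  | none, q :: qs => chainFrom (some q) qs
  | some p, q :: qs => (q - p) :: chainFrom (some q) qs

def lastOf : Option Int → List Int → Option Int
  | prev, [] => prev
  | _, x :: xs => lastOf (some x) xs

theorem chainFrom_some (r : List Int) (a : Int) : chainFrom (some a) r = adjDiffs (a :: r) := by
  induction r generalizing a with
  | nil => rfl
  | cons b r ih => simp [chainFrom, adjDiffs, ih]

theorem chainFrom_none (t : List Int) : chainFrom none t = adjDiffs t := by
  cases t with
  | nil => rfl
  | cons a r => simp [chainFrom, chainFrom_some]

-- A's range/getD diff comprehension computes adjacent differences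
theorem pyAdjRow_cons (a : Int) (r : List Int) :
    pyAdjRow (a :: r) = (List.range r.length).map
      (fun i => r.getD i 0 - (a :: r).getD i 0) := by
  simp only [pyAdjRow, List.length_cons, List.range_succ_eq_map]
  simp [List.filter_map, List.map_map, Function.comp_def]

theorem pyAdjRow_eq_adjDiffs (t : List Int) : pyAdjRow t = adjDiffs t := by
  cases t with
  | nil => rfl
  | cons a r =>
    rw [pyAdjRow_cons]
    induction r generalizing a with
    | nil => rfl
    | cons b r' ih =>
      have h := ih b
      simp only [List.length_cons, List.range_succ_eq_map, List.map_cons, List.map_map,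
        Function.comp_def, List.getD_cons_zero, List.getD_cons_succ, adjDiffs] at h ⊢
      rw [h]

-- B's inner fold, characterised
theorem foldl_altStep (sbol : List Int) (L : List (Int × Int)) (acc : List Int) (prev : Option Int) :
    L.foldl (altStep sbol) (acc, prev) =
      (acc ++ chainFrom prev ((L.filter (fun p => sbol.contains p.2)).map (fun p => p.1)),
       lastOf prev ((L.filter (fun p => sbol.contains p.2)).map (fun p => p.1))) := by
  induction L generalizing acc prev with
  | nil => simp [chainFrom, lastOf]
  | cons q L ih =>
    by_cases h : sbol.contains q.2
    · simp only [List.foldl_cons, altStep, h, if_true, List.filter_cons, List.map_cons]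
      rw [ih]
      cases prev with
      | none => simp [chainFrom, lastOf]
      | some p => simp [chainFrom, lastOf]
    · simp only [List.foldl_cons, altStep, h, List.filter_cons]
      simp only [Bool.false_eq_true, if_false]
      exact ih acc prev

-- appending the sentence length: adjDiffs (P ++ [x]) in terms of chainFrom/lastOf
theorem chainFrom_append_last (P : List Int) (prev : Option Int) (x : Int) :
    chainFrom prev (P ++ [x]) =
      (match lastOf prev P with
       | some p => chainFrom prev P ++ [x - p]
       | none => chainFrom prev P) := by
  induction P generalizing prev with
  | nil => cases prev <;> simp [chainFrom, lastOf]
  | cons q P ih =>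
    cases prev with
    | none =>
      simp only [List.cons_append, chainFrom, lastOf]
      exact ih (some q)
    | some p =>
      simp only [List.cons_append, chainFrom, lastOf]
      rw [ih (some q)]
      cases h : lastOf (some q) P <;> simp

-- the per-sentence rows agree
theorem altRow_eq (sbol : List Int) (s : List Int) :
    altRow sbol s =
      pyAdjRow ((((PySem.List.enumerate s 0).filter (fun p => sbol.contains p.2)).map (fun p => p.1))
        ++ [(s.length : Int)]) := by
  rw [pyAdjRow_eq_adjDiffs, ← chainFrom_none, chainFrom_append_last]
  simp only [altRow, foldl_altStep]
  cases h : lastOf none (((PySem.List.enumerate s 0).filter (fun p => sbol.contains p.2)).map (fun p => p.1)) <;>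
    simp

-- B's outer fold builds the three maps
theorem foldl_triple (sbol : List Int) (l : List (List Int)) (a : List Int)
    (b c : List (List Int)) :
    l.foldl
      (fun (acc : List Int × List (List Int) × List (List Int)) s =>
        let intervals := altRow sbol s
        (acc.1 ++ [(intervals.length : Int)],
         acc.2.1 ++ [intervals],
         acc.2.2 ++ [intervals.map (fun x => if 0 < x then x - 1 else 0)]))
      (a, b, c) =
      (a ++ l.map (fun s => ((altRow sbol s).length : Int)),
       b ++ l.map (fun s => altRow sbol s),
       c ++ l.map (fun s => (altRow sbol s).map (fun x => if 0 < x then x - 1 else 0))) := by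
  induction l generalizing a b c with
  | nil => simp
  | cons s l ih => simp [ih]

-- A's range-indexed zip of XX1 with source_lengths is a single map over source
theorem range_map_getD (l : List (List Int)) (g : List Int → List Int) :
    (List.range (l.map g).length).map
      (fun i => (l.map g).getD i [] ++ [(l.map (fun s => ((s.length : Nat) : Int))).getD i 0]) =
      l.map (fun s => g s ++ [((s.length : Nat) : Int)]) := by
  induction l with
  | nil => rfl
  | cons s l ih =>
    simp only [List.map_cons, List.length_cons, List.range_succ_eq_map, List.map_cons,
      List.map_map, List.getD_cons_zero, Function.comp_def, List.getD_cons_succ]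
    rw [ih]

-- ===== VERDICT (by name: the statement is the Claim_ definition above) =====
theorem get_sents_lenth_new_spec : Claim_equal_get_sents_lenth_new := by
  intro source sbol _ hpre
  unfold Spec_get_sents_lenth_new
  cases source with
  | nil => exact absurd rfl hpre
  | cons s0 rest =>
    show get_sents_lenth_new (s0 :: rest) sbol = get_sents_lenth_new_alt (s0 :: rest) sbol
    unfold get_sents_lenth_new get_sents_lenth_new_alt
    dsimp only [List.isEmpty_cons, Bool.false_eq_true, if_false]
    rw [foldl_triple]
    rw [range_map_getD (s0 :: rest)
      (fun s => ((PySem.List.enumerate s 0).filter (fun p => sbol.contains p.2)).map (fun p => p.1))]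
    simp only [List.map_map, Function.comp_def, List.nil_append]
    refine Prod.ext ?_ (Prod.ext ?_ ?_) <;>
      · apply List.map_congr_left
        intro s _
        rw [altRow_eq]
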